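-- pv_equiv track=rewrite | github.com/CharTyr/MaiBot_LLM2pic | plugin.py | parse_style_from_prompt
-- ===== SOURCE A (Python) =====
-- from typing import List, Tuple, Type, Optional
--
-- def parse_style_from_prompt(prompt: str) -> Tuple[Optional[str], str]:
--     """
--     从 prompt 中解析风格前缀
--
--     Args:
--         prompt: 原始 prompt
--
--     Returns:
--         Tuple[Optional[str], str]: (style, remaining_prompt)
--     """
--     prompt = prompt.strip()
--     lower_prompt = prompt.lower()
--
--     # 检查是否以 anime 或 real 开头
--     for style in ["anime", "real"]:
--         if lower_prompt.startswith(style + " "):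
--             remaining = prompt[len(style):].strip()
--             return style, remaining
--
--     return None, prompt
-- ===== SOURCE B (Python) =====
-- from typing import Tuple, Optional
--
-- KEYWORDS = ("anime", "real")
--
-- def parse_style_from_prompt(prompt: str) -> Tuple[Optional[str], str]:
--     # Single character-by-character scan: track which keywords are still live
--     # candidates; at the first space, a live keyword of exactly that length wins.
--     prompt = prompt.strip()
--     live = [0, 1]
--     i = 0
--     for ch in prompt:
--         c = ch.lower()
--         if c == ' ':
--             for k in live:
--                 if len(KEYWORDS[k]) == i:
--                     return KEYWORDS[k], prompt[i + 1:].strip()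
--             return None, prompt
--         live = [k for k in live if i < len(KEYWORDS[k]) and KEYWORDS[k][i] == c]
--         if not live:
--             return None, prompt
--         i += 1
--     return None, prompt
-- ===== Notes on version B (the rewrite author's own statement) =====
-- stated objective: alternative
-- what changed: B replaces A's loop of startswith prefix tests and slicing by a single left-to-right character scan that maintains the list of still-live keyword candidates (a tiny DFA) and decides at the first space.
import Mathlib
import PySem

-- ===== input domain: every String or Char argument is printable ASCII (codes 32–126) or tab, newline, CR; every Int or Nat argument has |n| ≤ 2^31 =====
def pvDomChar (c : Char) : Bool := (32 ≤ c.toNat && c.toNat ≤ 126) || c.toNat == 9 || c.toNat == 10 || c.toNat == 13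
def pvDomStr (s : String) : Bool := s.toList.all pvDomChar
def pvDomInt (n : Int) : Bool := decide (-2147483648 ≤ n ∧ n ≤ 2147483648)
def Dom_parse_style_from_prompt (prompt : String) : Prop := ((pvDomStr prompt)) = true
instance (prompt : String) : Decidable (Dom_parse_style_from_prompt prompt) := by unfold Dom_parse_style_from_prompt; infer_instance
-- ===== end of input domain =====

-- B replaces A's startswith-and-slice prefix loop by a single left-to-right
-- character scan maintaining the list of still-live keyword candidates
-- (a tiny DFA); same asymptotic cost, a different algorithm.

-- ===== PORT A =====
-- the 'for style in ["anime", "real"]' loop with its early return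
def psp_loop (p lowerP : String) : List String → Option String × String
  | [] => (none, p)
  | style :: rest =>
      if PySem.Str.startswith lowerP (style ++ " ") then
        (some style, PySem.Str.strip (PySem.Str.slice p (some (PySem.Str.len style)) none))
      else psp_loop p lowerP rest

def parse_style_from_prompt (prompt : String) : Option String × String :=
  let p := PySem.Str.strip prompt
  let lowerP := PySem.Str.lower p
  psp_loop p lowerP ["anime", "real"]

-- ===== PORT B =====
def pvKeywords : List String := ["anime", "real"]

-- the 'for ch in prompt' scan of Source B: i = current index, live = indices of
-- keywords still matching the scanned (lowercased) characters
def bScan (p : String) : Nat → List Nat → List Char → Option String × String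
  | _, _, [] => (none, p)
  | i, live, ch :: rest =>
      let c := PySem.Chars.lowerChar ch
      if c = ' ' then
        match live.find? (fun k => (pvKeywords.getD k "").length == i) with
        | some k => (some (pvKeywords.getD k ""),
                     PySem.Str.strip (PySem.Str.slice p (some ((i : Int) + 1)) none))
        | none => (none, p)
      else
        let live' := live.filter
          (fun k => decide (i < (pvKeywords.getD k "").length)
                    && ((pvKeywords.getD k "").toList.getD i ' ' == c))
        if live' = [] then (none, p) else bScan p (i + 1) live' rest

def parse_style_from_prompt_alt (prompt : String) : Option String × String :=
  let p := PySem.Str.strip prompt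
  bScan p 0 [0, 1] p.toList

-- ===== PRECONDITION & SPEC =====
def Spec_parse_style_from_prompt (prompt : String) (out : Option String × String) : Prop := out = parse_style_from_prompt_alt prompt
instance (prompt : String) (out : Option String × String) : Decidable (Spec_parse_style_from_prompt prompt out) := by unfold Spec_parse_style_from_prompt; infer_instance

-- ===== CLAIM (what is proved, stated in full; the proofs are below) =====
def Claim_equal_parse_style_from_prompt : Prop := ∀ (prompt : String), Dom_parse_style_from_prompt prompt → Spec_parse_style_from_prompt prompt (parse_style_from_prompt prompt)

-- ===== LEMMAS AND PROOFS =====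

theorem lowerChar_eq_space {c : Char} : PySem.Chars.lowerChar c = ' ' ↔ c = ' ' := by
  constructor
  · intro h
    unfold PySem.Chars.lowerChar at h
    split at h
    · next hu =>
      exfalso
      unfold PySem.Chars.isupper at hu
      simp only [Bool.and_eq_true, decide_eq_true_eq] at hu
      have h1 : 65 ≤ c.toNat := hu.1
      have h2 : c.toNat ≤ 90 := hu.2
      have hv : (c.toNat + 32).isValidChar := by left; omega
      have h3 := congrArg Char.toNat h
      rw [show (Char.ofNat (c.toNat + 32)).toNat = c.toNat + 32 by simp [Char.ofNat, hv]] at h3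
      have h4 : (' ' : Char).toNat = 32 := rfl
      omega
    · exact h
  · intro h; subst h; rfl

theorem strip_space_cons (t : List Char) :
    PySem.Chars.strip (' ' :: t) = PySem.Chars.strip t := by
  simp [PySem.Chars.strip, PySem.Chars.lstrip,
    show PySem.Chars.isspace ' ' = true from rfl]

-- a run of bScan with a single live candidate k: it matches the rest of the
-- keyword character by character, then demands a space
theorem find?_single {A : Type} (p : A → Bool) (a : A) :
    List.find? p [a] = if p a then some a else none := by
  cases h : p a <;> simp [List.find?_cons_of_pos, List.find?_cons_of_neg, h]

theorem filter_single {A : Type} (p : A → Bool) (a : A) :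
    List.filter p [a] = if p a then [a] else [] := by
  cases h : p a <;> simp [List.filter_cons_of_pos, List.filter_cons_of_neg, h]

theorem bScan_single (p : String) (k : Nat) (kw : List Char)
    (hkw : (pvKeywords.getD k "").toList = kw)
    (hlen : (pvKeywords.getD k "").length = kw.length)
    (hsp : ' ' ∉ kw) :
    ∀ (rest : List Char) (i : Nat), i ≤ kw.length →
    bScan p i [k] rest =
      if (kw.drop i ++ [' ']) <+: rest.map PySem.Chars.lowerChar
      then (some (pvKeywords.getD k ""),
            PySem.Str.strip (PySem.Str.slice p (some ((kw.length : Int) + 1)) none))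
      else (none, p) := by
  intro rest
  induction rest with
  | nil =>
      intro i hi
      rw [if_neg (by simp)]
      rfl
  | cons ch t ih =>
      intro i hi
      simp only [bScan, List.map_cons]
      by_cases hc : PySem.Chars.lowerChar ch = ' '
      · rw [if_pos hc, find?_single]
        rcases Nat.lt_or_ge i kw.length with hlt | hge
        · -- i < len: no keyword of length i among live; prefix fails on kw[i] ≠ ' '
          rw [if_neg (show ¬ ((pvKeywords.getD k "").length == i) = true by
            simp only [hlen, beq_iff_eq]; omega)]
          rw [if_neg]
          rw [List.drop_eq_getElem_cons hlt]
          simp only [List.cons_append, List.cons_prefix_cons]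
          rintro ⟨h1, -⟩
          exact hsp ((h1.trans hc) ▸ List.getElem_mem hlt)
        · -- i = len: match found
          have hieq : i = kw.length := le_antisymm hi hge
          subst hieq
          rw [if_pos (show ((pvKeywords.getD k "").length == kw.length) = true by
            simp only [hlen, beq_iff_eq])]
          rw [if_pos (show (List.drop kw.length kw ++ [' ']) <+:
              PySem.Chars.lowerChar ch :: List.map PySem.Chars.lowerChar t by
            simp [List.drop_length, List.cons_prefix_cons, hc])]
      · rw [if_neg hc, filter_single]
        have hgd : (pvKeywords.getD k "").toList.getD i ' ' = kw.getD i ' ' := by rw [hkw]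
        rcases Nat.lt_or_ge i kw.length with hlt | hge
        · by_cases hmatch : kw.getD i ' ' = PySem.Chars.lowerChar ch
          · rw [if_pos (show (decide (i < (pvKeywords.getD k "").length)
                && ((pvKeywords.getD k "").toList.getD i ' ' == PySem.Chars.lowerChar ch)) = true by
              simp only [hlen, hgd, hmatch, Bool.and_eq_true, decide_eq_true_eq, beq_iff_eq]
              exact ⟨hlt, trivial⟩)]
            rw [if_neg (by simp)]
            rw [ih (i + 1) hlt]
            have hdrop : kw.drop i = kw[i] :: kw.drop (i + 1) := List.drop_eq_getElem_cons hlt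
            have hgd2 : kw.getD i ' ' = kw[i] := List.getD_eq_getElem kw ' ' hlt
            rw [hdrop]
            simp only [List.cons_append, List.cons_prefix_cons]
            rw [← hgd2, hmatch]
            simp
          · rw [if_neg (show ¬ ((decide (i < (pvKeywords.getD k "").length)
                && ((pvKeywords.getD k "").toList.getD i ' ' == PySem.Chars.lowerChar ch)) = true) by
              simp only [hlen, hgd, Bool.and_eq_true, decide_eq_true_eq, beq_iff_eq]
              rintro ⟨-, h2⟩; exact hmatch h2)]
            rw [if_pos rfl]
            rw [if_neg]
            rw [List.drop_eq_getElem_cons hlt]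
            simp only [List.cons_append, List.cons_prefix_cons]
            rintro ⟨h1, -⟩
            exact hmatch ((List.getD_eq_getElem kw ' ' hlt).trans h1)
        · have hieq : i = kw.length := le_antisymm hi hge
          subst hieq
          rw [if_neg (show ¬ ((decide (kw.length < (pvKeywords.getD k "").length)
              && ((pvKeywords.getD k "").toList.getD kw.length ' ' == PySem.Chars.lowerChar ch)) = true) by
            simp only [hlen, Bool.and_eq_true, decide_eq_true_eq]
            rintro ⟨h1, -⟩; omega)]
          rw [if_pos rfl]
          rw [if_neg]
          simp only [List.drop_length, List.nil_append, List.cons_prefix_cons]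
          rintro ⟨h1, -⟩
          exact hc h1.symm

-- the full scan from the start: a three-way case split on which lowered
-- keyword-plus-space is a prefix of the lowered prompt
theorem bScan_start (p : String) (l : List Char) :
    bScan p 0 [0, 1] l =
      if ['a','n','i','m','e',' '] <+: l.map PySem.Chars.lowerChar
      then (some "anime", PySem.Str.strip (PySem.Str.slice p (some 6) none))
      else if ['r','e','a','l',' '] <+: l.map PySem.Chars.lowerChar
      then (some "real", PySem.Str.strip (PySem.Str.slice p (some 5) none))
      else (none, p) := by
  cases l with
  | nil => simp [bScan]
  | cons ch t =>
      simp only [bScan, List.map_cons]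
      by_cases hc : PySem.Chars.lowerChar ch = ' '
      · rw [if_pos hc]
        have hfind : List.find? (fun k => (pvKeywords.getD k "").length == 0) [0, 1] = none := by
          decide
        rw [hfind]
        rw [if_neg (by simp [List.cons_prefix_cons, hc]), if_neg (by simp [List.cons_prefix_cons, hc])]
      · rw [if_neg hc]
        by_cases ha : PySem.Chars.lowerChar ch = 'a'
        · have hfil : List.filter
              (fun k => decide (0 < (pvKeywords.getD k "").length)
                && ((pvKeywords.getD k "").toList.getD 0 ' ' == PySem.Chars.lowerChar ch)) [0, 1]
              = [0] := by
            rw [ha]; decide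
          rw [hfil]
          rw [if_neg (by simp)]
          rw [bScan_single p 0 ['a','n','i','m','e'] (by decide) (by decide) (by decide) t 1
            (by decide)]
          rw [show List.drop 1 ['a','n','i','m','e'] ++ [' '] = (['n','i','m','e',' '] : List Char)
            from rfl]
          by_cases h5 : ['n','i','m','e',' '] <+: List.map PySem.Chars.lowerChar t
          · rw [if_pos h5,
              if_pos (List.cons_prefix_cons.mpr ⟨ha.symm, h5⟩)]
            norm_num [pvKeywords]
          · rw [if_neg h5,
              if_neg (fun hcon => h5 (List.cons_prefix_cons.mp hcon).2),
              if_neg (fun hcon => by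
                have h1 := (List.cons_prefix_cons.mp hcon).1
                rw [ha] at h1; cases h1)]
        · by_cases hr : PySem.Chars.lowerChar ch = 'r'
          · have hfil : List.filter
                (fun k => decide (0 < (pvKeywords.getD k "").length)
                  && ((pvKeywords.getD k "").toList.getD 0 ' ' == PySem.Chars.lowerChar ch)) [0, 1]
                = [1] := by
              rw [hr]; decide
            rw [hfil]
            rw [if_neg (by simp)]
            rw [bScan_single p 1 ['r','e','a','l'] (by decide) (by decide) (by decide) t 1
              (by decide)]
            rw [show List.drop 1 ['r','e','a','l'] ++ [' '] = (['e','a','l',' '] : List Char)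
              from rfl]
            by_cases h4 : ['e','a','l',' '] <+: List.map PySem.Chars.lowerChar t
            · rw [if_pos h4,
                if_neg (fun hcon => by
                  have h1 := (List.cons_prefix_cons.mp hcon).1
                  rw [hr] at h1; cases h1),
                if_pos (List.cons_prefix_cons.mpr ⟨hr.symm, h4⟩)]
              norm_num [pvKeywords]
            · rw [if_neg h4,
                if_neg (fun hcon => by
                  have h1 := (List.cons_prefix_cons.mp hcon).1
                  rw [hr] at h1; cases h1),
                if_neg (fun hcon => h4 (List.cons_prefix_cons.mp hcon).2)]
          · have hfil : List.filter
                (fun k => decide (0 < (pvKeywords.getD k "").length)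
                  && ((pvKeywords.getD k "").toList.getD 0 ' ' == PySem.Chars.lowerChar ch)) [0, 1]
                = [] := by
              simp [List.filter, pvKeywords,
                beq_eq_false_iff_ne.mpr (fun h => ha h.symm),
                beq_eq_false_iff_ne.mpr (fun h => hr h.symm)]
            rw [hfil, if_pos rfl]
            rw [if_neg (fun hcon => ha (List.cons_prefix_cons.mp hcon).1.symm),
              if_neg (fun hcon => hr (List.cons_prefix_cons.mp hcon).1.symm)]

-- A's startswith over the lowered prompt, as a prefix condition on the char list
theorem startswith_lower (l : List Char) (w : String) :
    PySem.Str.startswith (PySem.Str.lower (String.ofList l)) w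
      = decide (w.toList <+: List.map PySem.Chars.lowerChar l) := by
  by_cases h : (w.toList <+: List.map PySem.Chars.lowerChar l)
  · rw [decide_eq_true h, PySem.Str.startswith_eq, PySem.Chars.startswith_iff]
    simpa [PySem.Str.lower, String.toList_ofList, PySem.Chars.lower] using h
  · rw [decide_eq_false h]
    apply Bool.not_eq_true _ |>.mp
    rw [PySem.Str.startswith_eq, PySem.Chars.startswith_iff]
    simpa [PySem.Str.lower, String.toList_ofList, PySem.Chars.lower] using h

-- if the lowered prompt has a space at index n, then stripping the slice from n
-- equals stripping the slice from n+1 (the leading space is stripped anyway)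
theorem strip_slice_space (l : List Char) (n : Nat) (hn : n < l.length) (hsp : l[n] = ' ') :
    PySem.Str.strip (PySem.Str.slice (String.ofList l) (some (n : Int)) none)
      = PySem.Str.strip (PySem.Str.slice (String.ofList l) (some ((n : Int) + 1)) none) := by
  have h1 : PySem.Str.slice (String.ofList l) (some (n : Int)) none
      = String.ofList (l.drop n) := by
    simp only [PySem.Str.slice, String.toList_ofList]
    rw [PySem.Chars.slice_eq_listSlice, PySem.List.slice_from _ (by positivity)]
    simp
  have h2 : PySem.Str.slice (String.ofList l) (some ((n : Int) + 1)) none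
      = String.ofList (l.drop (n + 1)) := by
    simp only [PySem.Str.slice, String.toList_ofList]
    rw [PySem.Chars.slice_eq_listSlice,
      show ((n : Int) + 1) = ((n + 1 : Nat) : Int) by push_cast; ring,
      PySem.List.slice_from _ (by positivity)]
    simp
  rw [h1, h2, List.drop_eq_getElem_cons hn, hsp]
  simp [PySem.Str.strip, String.toList_ofList, strip_space_cons]

theorem prefix_getElem {l1 l2 : List Char} (h : l1 <+: l2) {i : Nat}
    (hi : i < l1.length) (hi2 : i < l2.length) : l2[i] = l1[i] := by
  obtain ⟨s, rfl⟩ := h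
  exact List.getElem_append_left hi

-- a space at lowered index n means a space at index n of the original
theorem getElem_space_of_map {l : List Char} {n : Nat} (hn : n < l.length)
    (h : (l.map PySem.Chars.lowerChar)[n]'(by simpa using hn) = ' ') : l[n] = ' ' := by
  rw [List.getElem_map] at h
  exact lowerChar_eq_space.mp h

theorem core (l : List Char) :
    psp_loop (String.ofList l) (PySem.Str.lower (String.ofList l)) ["anime", "real"]
      = bScan (String.ofList l) 0 [0, 1] l := by
  rw [bScan_start]
  have hsa := startswith_lower l ("anime" ++ " ")
  have hsr := startswith_lower l ("real" ++ " ")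
  rw [show ("anime" ++ " " : String).toList = ['a','n','i','m','e',' '] from rfl] at hsa
  rw [show ("real" ++ " " : String).toList = ['r','e','a','l',' '] from rfl] at hsr
  by_cases hA : (['a','n','i','m','e',' '] <+: l.map PySem.Chars.lowerChar)
  · rw [if_pos hA]
    have hlen : 5 < l.length := by
      have := hA.length_le; simp at this; omega
    have hg : l[5]'hlen = ' ' := by
      apply getElem_space_of_map hlen
      rw [prefix_getElem hA (by simp) (by simp [hlen])]
      rfl
    simp only [psp_loop, hsa, decide_eq_true hA, if_true]
    rw [show PySem.Str.len "anime" = (5 : Int) from rfl]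
    have hss := strip_slice_space l 5 hlen hg
    norm_num at hss
    rw [hss]
  · rw [if_neg hA]
    by_cases hR : (['r','e','a','l',' '] <+: l.map PySem.Chars.lowerChar)
    · rw [if_pos hR]
      have hlen : 4 < l.length := by
        have := hR.length_le; simp at this; omega
      have hg : l[4]'hlen = ' ' := by
        apply getElem_space_of_map hlen
        rw [prefix_getElem hR (by simp) (by simp [hlen])]
        rfl
      simp only [psp_loop, hsa, hsr, decide_eq_false hA, decide_eq_true hR,
        Bool.false_eq_true, if_false, if_true]
      rw [show PySem.Str.len "real" = (4 : Int) from rfl]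
      have hss := strip_slice_space l 4 hlen hg
      norm_num at hss
      rw [hss]
    · rw [if_neg hR]
      simp only [psp_loop, hsa, hsr, decide_eq_false hA, decide_eq_false hR,
        Bool.false_eq_true, if_false]

-- ===== VERDICT (by name: the statement is the Claim_ definition above) =====
theorem parse_style_from_prompt_spec : Claim_equal_parse_style_from_prompt := by
  intro prompt _
  unfold Spec_parse_style_from_prompt parse_style_from_prompt parse_style_from_prompt_alt
  have h := core (PySem.Str.strip prompt).toList
  rwa [String.ofList_toList] at h
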